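-- pv_equiv track=rewrite | github.com/BitmanAlan/alanpdf-skill | scripts/alanpdf.py | esc_code
-- ===== SOURCE A (Python) =====
-- def esc(text):
--     return text.replace("&","&amp;").replace("<","&lt;").replace(">","&gt;")
--
-- def esc_code(text):
--     """Escape for code blocks: preserve indentation and newlines."""
--     out = []
--     for line in text.split('\n'):
--         e = esc(line)
--         stripped = e.lstrip(' ')
--         indent = len(e) - len(stripped)
--         out.append('&nbsp;' * indent + stripped)
--     return '<br/>'.join(out)
-- ===== SOURCE B (Python) =====
-- def esc_code(text):
--     """Escape for code blocks: preserve indentation and newlines."""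
--     out = []
--     indent = True
--     for ch in text:
--         if ch == '\n':
--             out.append('<br/>')
--             indent = True
--         elif indent and ch == ' ':
--             out.append('&nbsp;')
--         else:
--             indent = False
--             if ch == '&':
--                 out.append('&amp;')
--             elif ch == '<':
--                 out.append('&lt;')
--             elif ch == '>':
--                 out.append('&gt;')
--             else:
--                 out.append(ch)
--     return ''.join(out)
-- ===== Notes on version B (the rewrite author's own statement) =====
-- stated objective: alternative
-- what changed: A splits the text into lines, escapes each line with three chained replace passes, strips and counts leading spaces and re-joins; B is a single left-to-right pass over the characters with a boolean indentation flag, emitting the escape, nbsp and br pieces directly.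
import Mathlib
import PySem

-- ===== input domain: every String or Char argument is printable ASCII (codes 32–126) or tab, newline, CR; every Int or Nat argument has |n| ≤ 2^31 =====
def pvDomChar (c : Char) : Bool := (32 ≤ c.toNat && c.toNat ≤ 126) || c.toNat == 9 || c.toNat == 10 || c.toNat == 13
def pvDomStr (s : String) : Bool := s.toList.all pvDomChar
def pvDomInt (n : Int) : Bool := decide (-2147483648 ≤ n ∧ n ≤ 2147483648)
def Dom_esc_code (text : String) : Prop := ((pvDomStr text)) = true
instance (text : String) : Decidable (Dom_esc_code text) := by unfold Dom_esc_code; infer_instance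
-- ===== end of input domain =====

-- B replaces A's per-line split / chained-replace / strip-and-count pipeline by one character-level pass with an indentation flag (alternative decomposition, same cost).

-- ===== PORT A =====
-- esc(text): the three chained replaces
def escA (cs : List Char) : List Char :=
  PySem.Chars.replace (PySem.Chars.replace (PySem.Chars.replace cs ['&'] "&amp;".toList)
    ['<'] "&lt;".toList) ['>'] "&gt;".toList

def esc_code (text : String) : String :=
  let out := (PySem.Chars.splitOn text.toList ['\n']).foldl (fun out line =>
    let e := escA line
    let stripped := e.dropWhile (fun c => c == ' ')   -- e.lstrip(' '): drops leading spaces only (exact)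
    let indent : Int := (e.length : Int) - (stripped.length : Int)
    out ++ [PySem.List.pyRepeat "&nbsp;".toList indent ++ stripped]) ([] : List (List Char))
  String.mk (PySem.Chars.join "<br/>".toList out)

-- ===== PORT B =====
-- the if/elif chain of Source B's else branch
def escCharB (c : Char) : List Char :=
  if c = '&' then "&amp;".toList
  else if c = '<' then "&lt;".toList
  else if c = '>' then "&gt;".toList
  else [c]

def esc_code_alt (text : String) : String :=
  let st := text.toList.foldl (fun (st : List (List Char) × Bool) ch =>
    if ch = '\n' then (st.1 ++ ["<br/>".toList], true)
    else if st.2 && (ch == ' ') then (st.1 ++ ["&nbsp;".toList], st.2)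
    else (st.1 ++ [escCharB ch], false)) (([] : List (List Char)), true)
  String.mk (PySem.Chars.join [] st.1)

-- ===== PRECONDITION & SPEC =====
def Spec_esc_code (text : String) (out : String) : Prop := out = esc_code_alt text
instance (text : String) (out : String) : Decidable (Spec_esc_code text out) := by unfold Spec_esc_code; infer_instance

-- ===== CLAIM (what is proved, stated in full; the proofs are below) =====
def Claim_equal_esc_code : Prop := ∀ (text : String), Dom_esc_code text → Spec_esc_code text (esc_code text)

-- ===== LEMMAS AND PROOFS =====

-- escaping, character by character
def Ech (cs : List Char) : List Char := cs.flatMap escCharB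

-- pure per-line spec: Bool flag = still inside the leading indentation
def specL : List Char → Bool → List Char
  | [], _ => []
  | c :: t, b => if b && (c == ' ') then "&nbsp;".toList ++ specL t true else escCharB c ++ specL t false

-- pure whole-text spec
def specB : List Char → Bool → List Char
  | [], _ => []
  | c :: t, b =>
    if c = '\n' then "<br/>".toList ++ specB t true
    else if b && (c == ' ') then "&nbsp;".toList ++ specB t true
    else escCharB c ++ specB t false

-- structural model of text.split('\n')
def splitNL : List Char → List Char → List (List Char)
  | [], cur => [cur.reverse]
  | c :: t, cur => if c = '\n' then cur.reverse :: splitNL t [] else splitNL t (c :: cur)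

theorem splitOn_go_eq (fuel : Nat) : ∀ (l cur : List Char) (accs : List (List Char)),
    l.length ≤ fuel →
    PySem.Chars.splitOn.go ['\n'] fuel l cur accs = accs.reverse ++ splitNL l cur := by
  induction fuel with
  | zero =>
    intro l cur accs h
    have : l = [] := List.length_eq_zero_iff.mp (Nat.le_zero.mp h)
    subst this
    simp [PySem.Chars.splitOn.go, splitNL]
  | succ n ih =>
    intro l cur accs h
    cases l with
    | nil => simp [PySem.Chars.splitOn.go, splitNL]
    | cons c rest =>
      have h' : rest.length ≤ n := by
        rw [List.length_cons] at h; omega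
      simp only [PySem.Chars.splitOn.go, List.isPrefixOf, Bool.and_true]
      by_cases hc : c = '\n'
      · subst hc
        simp only [beq_self_eq_true, if_pos, List.length_cons, List.length_nil,
          List.drop_succ_cons, List.drop_zero]
        rw [ih _ _ _ h']
        simp [splitNL]
      · have hb : ('\n' == c) = false := beq_eq_false_iff_ne.mpr (Ne.symm hc)
        simp only [hb, if_neg Bool.false_ne_true]
        rw [ih _ _ _ h']
        simp [splitNL, hc]

theorem splitOn_eq (cs : List Char) :
    PySem.Chars.splitOn cs ['\n'] = splitNL cs [] := by
  unfold PySem.Chars.splitOn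
  rw [splitOn_go_eq _ _ _ _ (by omega)]
  simp

theorem replace_go_eq (a : Char) (new : List Char) (fuel : Nat) : ∀ (l acc : List Char),
    l.length ≤ fuel →
    PySem.Chars.replace.go [a] new fuel l acc
      = acc.reverse ++ l.flatMap (fun c => if c = a then new else [c]) := by
  induction fuel with
  | zero =>
    intro l acc h
    have : l = [] := List.length_eq_zero_iff.mp (Nat.le_zero.mp h)
    subst this; simp [PySem.Chars.replace.go]
  | succ n ih =>
    intro l acc h
    cases l with
    | nil => simp [PySem.Chars.replace.go]
    | cons c rest =>
      have h' : rest.length ≤ n := by rw [List.length_cons] at h; omega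
      simp only [PySem.Chars.replace.go, List.isPrefixOf, Bool.and_true]
      by_cases hc : c = a
      · subst hc
        simp only [beq_self_eq_true, if_pos, List.length_cons, List.length_nil,
          List.drop_succ_cons, List.drop_zero]
        rw [ih _ _ h']
        simp
      · have hb : (a == c) = false := beq_eq_false_iff_ne.mpr (Ne.symm hc)
        simp only [hb, if_neg Bool.false_ne_true]
        rw [ih _ _ h']
        simp [hc]

theorem replace_single (cs : List Char) (a : Char) (new : List Char) :
    PySem.Chars.replace cs [a] new = cs.flatMap (fun c => if c = a then new else [c]) := by
  unfold PySem.Chars.replace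
  rw [if_neg (by simp), replace_go_eq _ _ _ _ _ (le_refl _)]
  simp

theorem escA_eq (cs : List Char) : escA cs = Ech cs := by
  unfold escA Ech
  rw [replace_single, replace_single, replace_single, List.flatMap_assoc, List.flatMap_assoc]
  apply List.flatMap_congr
  intro c _
  by_cases h1 : c = '&'
  · subst h1; decide
  · by_cases h2 : c = '<'
    · subst h2; decide
    · by_cases h3 : c = '>'
      · subst h3; decide
      · simp [escCharB, h1, h2, h3]

theorem specL_false (l : List Char) : specL l false = Ech l := by
  induction l with
  | nil => simp [specL, Ech]
  | cons c t ih => simp [specL, Ech]; simp [Ech] at ih; rw [ih]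

-- the escape of a non-space character never starts with a space
theorem escChar_head (c : Char) (h : ¬ (c = ' ')) :
    ∃ d t, escCharB c = d :: t ∧ (d == ' ') = false := by
  by_cases h1 : c = '&'
  · subst h1; exact ⟨'&', _, rfl, by decide⟩
  · by_cases h2 : c = '<'
    · subst h2; exact ⟨'&', _, rfl, by decide⟩
    · by_cases h3 : c = '>'
      · subst h3; exact ⟨'&', _, rfl, by decide⟩
      · exact ⟨c, [], by simp [escCharB, h1, h2, h3], beq_eq_false_iff_ne.mpr h⟩

theorem dropWhile_Ech (c : Char) (t : List Char) (h : ¬ (c = ' ')) :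
    (Ech (c :: t)).dropWhile (fun c => c == ' ') = Ech (c :: t) := by
  obtain ⟨d, tl, he, hd⟩ := escChar_head c h
  simp [Ech, he, hd]

-- A's per-line computation (escape, lstrip, count, pad) equals specL · true
theorem line_eq (l : List Char) :
    PySem.List.pyRepeat "&nbsp;".toList
        ((((Ech l).length : Int) - (((Ech l).dropWhile (fun c => c == ' ')).length : Int)))
      ++ (Ech l).dropWhile (fun c => c == ' ') = specL l true := by
  induction l with
  | nil => simp [Ech, specL, PySem.List.pyRepeat]
  | cons c t ih =>
    by_cases hc : c = ' '
    · subst hc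
      have he : Ech (' ' :: t) = ' ' :: Ech t := by
        have : escCharB ' ' = [' '] := by decide
        simp [Ech, this]
      rw [he]
      rw [List.dropWhile_cons_of_pos (by decide)]
      have hlen : ((Ech t).dropWhile (fun c => c == ' ')).length ≤ (Ech t).length :=
        List.length_dropWhile_le _ _
      rw [List.length_cons]
      have harith : ((((Ech t).length + 1 : Nat) : Int) - (((Ech t).dropWhile (fun c => c == ' ')).length : Int))
          = (((Ech t).length : Int) - (((Ech t).dropWhile (fun c => c == ' ')).length : Int)) + 1 := by
        push_cast; ring
      rw [harith]
      have hrep : ∀ (n : Int), 0 ≤ n → PySem.List.pyRepeat "&nbsp;".toList (n + 1)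
          = "&nbsp;".toList ++ PySem.List.pyRepeat "&nbsp;".toList n := by
        intro n hn
        have : (n + 1).toNat = n.toNat + 1 := by omega
        simp [PySem.List.pyRepeat, this, List.replicate_succ]
      rw [hrep _ (by omega)]
      rw [List.append_assoc, ih]
      simp [specL]
    · rw [dropWhile_Ech c t hc]
      simp only [sub_self]
      have hz : PySem.List.pyRepeat "&nbsp;".toList 0 = [] := by decide
      rw [hz, List.nil_append]
      simp [specL, hc, Ech, specL_false]

theorem specL_append (p l : List Char) :
    specL (p ++ l) true = specL p true ++ specL l (p.all (fun c => c == ' ')) := by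
  induction p with
  | nil => simp [specL]
  | cons c t ih =>
    by_cases hc : (c == ' ') = true
    · simp only [List.cons_append, specL, Bool.true_and, hc, if_pos, List.all_cons, ih,
        List.append_assoc]
    · simp only [List.cons_append, specL, Bool.true_and, hc, if_neg Bool.false_ne_true,
        List.all_cons, Bool.false_and, specL_false, Ech, List.flatMap_append, List.append_assoc]

theorem splitNL_ne_nil (t : List Char) : ∀ cur, splitNL t cur ≠ [] := by
  induction t with
  | nil => intro cur; simp [splitNL]
  | cons c r ih =>
    intro cur
    by_cases hc : c = '\n' <;> simp [splitNL, hc, ih]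

theorem join_two (sep x y : List Char) (r : List (List Char)) :
    PySem.Chars.join sep (x :: y :: r) = x ++ sep ++ PySem.Chars.join sep (y :: r) := by
  simp [PySem.Chars.join, List.intercalate, List.intersperse]

theorem join_one (sep x : List Char) : PySem.Chars.join sep [x] = x := by
  simp [PySem.Chars.join, List.intercalate]

-- joining the processed lines of a split = the one-pass spec, with the current partial line generalized
theorem main_split (cs : List Char) : ∀ cur : List Char,
    PySem.Chars.join "<br/>".toList ((splitNL cs cur).map (fun l => specL l true))
      = specL cur.reverse true ++ specB cs (cur.reverse.all (fun c => c == ' ')) := by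
  induction cs with
  | nil => intro cur; simp [splitNL, specB, join_one]
  | cons c t ih =>
    intro cur
    by_cases hc : c = '\n'
    · subst hc
      obtain ⟨y, r, hyr⟩ := List.exists_cons_of_ne_nil (splitNL_ne_nil t [])
      have h := ih []
      rw [hyr, List.map_cons] at h
      simp only [splitNL, if_pos rfl, if_true, hyr, List.map_cons]
      rw [join_two, h]
      simp [specL, specB]
    · simp only [splitNL, if_neg hc]
      rw [ih (c :: cur)]
      simp only [List.reverse_cons]
      rw [specL_append, List.all_append]
      have h1 : specL [c] (cur.reverse.all fun c => c == ' ')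
          = if (cur.reverse.all fun c => c == ' ') && (c == ' ') then "&nbsp;".toList else escCharB c := by
        by_cases hb : ((cur.reverse.all fun c => c == ' ') && (c == ' ')) = true <;>
          simp [specL, hb]
      rw [h1]
      have h2 : (specB (c :: t)) ((cur.reverse.all fun c => c == ' '))
          = if (cur.reverse.all fun c => c == ' ') && (c == ' ') then "&nbsp;".toList ++ specB t true
            else escCharB c ++ specB t false := by
        simp [specB, hc]
      rw [h2]
      rcases hb : ((cur.reverse.all fun c => c == ' ') && (c == ' ')) with _ | _ <;>
        rw [List.all_reverse] at hb <;> simp [hb, List.all_reverse, List.append_assoc]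

theorem join_nil_flatten (xs : List (List Char)) : PySem.Chars.join [] xs = xs.flatten := by
  induction xs with
  | nil => simp [PySem.Chars.join, List.intercalate]
  | cons x r ih =>
    cases r with
    | nil => simp [PySem.Chars.join, List.intercalate]
    | cons y s =>
      simp [PySem.Chars.join, List.intercalate, List.intersperse] at *
      simpa using ih

theorem foldl_map {α β : Type} (f : α → β) (L : List α) : ∀ init : List β,
    L.foldl (fun out x => out ++ [f x]) init = init ++ L.map f := by
  induction L with
  | nil => simp
  | cons x r ih => intro init; simp [List.foldl_cons, ih]

theorem B_invariant (cs : List Char) : ∀ (acc : List (List Char)) (b : Bool),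
    (cs.foldl (fun (st : List (List Char) × Bool) ch =>
      if ch = '\n' then (st.1 ++ ["<br/>".toList], true)
      else if st.2 && (ch == ' ') then (st.1 ++ ["&nbsp;".toList], st.2)
      else (st.1 ++ [escCharB ch], false)) (acc, b)).1.flatten
    = acc.flatten ++ specB cs b := by
  induction cs with
  | nil => simp [specB]
  | cons c t ih =>
    intro acc b
    by_cases hc : c = '\n'
    · subst hc
      simp only [List.foldl_cons, if_pos rfl, ih, List.flatten_append, specB, List.append_assoc]
      simp
    · rcases hb : (b && (c == ' ')) with _ | _
      · simp only [List.foldl_cons, if_neg hc, hb, if_neg Bool.false_ne_true, ih,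
          List.flatten_append, specB, List.append_assoc]
        simp [hc, hb]
      · have hb2 : b = true := by rcases b with _|_ <;> simp at hb ⊢
        have hsp : c = ' ' := by subst hb2; simpa using hb
        subst hb2; subst hsp
        simp only [List.foldl_cons, if_neg hc, hb, if_pos rfl, ih]
        simp [specB, hc]

-- A equals the one-pass spec
theorem A_eq_spec (text : String) : esc_code text = String.mk (specB text.toList true) := by
  unfold esc_code
  show String.mk (PySem.Chars.join "<br/>".toList
      ((PySem.Chars.splitOn text.toList ['\n']).foldl (fun out line =>
        out ++ [PySem.List.pyRepeat "&nbsp;".toList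
            (((escA line).length : Int) - (((escA line).dropWhile (fun c => c == ' ')).length : Int))
          ++ (escA line).dropWhile (fun c => c == ' ')]) [])) = _
  rw [foldl_map, List.nil_append, splitOn_eq]
  have hmap : ∀ l : List Char,
      PySem.List.pyRepeat "&nbsp;".toList
          (((escA l).length : Int) - (((escA l).dropWhile (fun c => c == ' ')).length : Int))
        ++ (escA l).dropWhile (fun c => c == ' ') = specL l true := by
    intro l
    rw [escA_eq]
    exact line_eq l
  rw [List.map_congr_left (fun l _ => hmap l)]
  rw [main_split]
  simp [specL]

-- B equals the one-pass spec
theorem B_eq_spec (text : String) : esc_code_alt text = String.mk (specB text.toList true) := by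
  unfold esc_code_alt
  show String.mk (PySem.Chars.join []
      (text.toList.foldl (fun (st : List (List Char) × Bool) ch =>
        if ch = '\n' then (st.1 ++ ["<br/>".toList], true)
        else if st.2 && (ch == ' ') then (st.1 ++ ["&nbsp;".toList], st.2)
        else (st.1 ++ [escCharB ch], false)) (([] : List (List Char)), true)).1) = _
  rw [join_nil_flatten, B_invariant]
  simp

-- ===== VERDICT (by name: the statement is the Claim_ definition above) =====
theorem esc_code_spec : Claim_equal_esc_code := by
  intro text _
  unfold Spec_esc_code
  rw [A_eq_spec, B_eq_spec]
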